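-- pv_equiv track=rewrite | github.com/fastrizwaan/tts | vte20.py | _get_line_indent
-- ===== SOURCE A (Python) =====
-- def _get_line_indent(line):
--     """Get the indentation of a line"""
--     indent = ""
--     for char in line:
--         if char in ' \t':
--             indent += char
--         else:
--             break
--     return indent
-- ===== SOURCE B (Python) =====
-- def _get_line_indent(line):
--     """Get the indentation of a line"""
--     stripped = line.lstrip(' \t')
--     return line[:len(line) - len(stripped)]
-- ===== Notes on version B (the rewrite author's own statement) =====
-- stated objective: simpler
-- what changed: Replaces the char-by-char accumulation loop (with break) by a strip-and-slice computation: lstrip(' \t') and a prefix slice of the suffix-length difference.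
import Mathlib
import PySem

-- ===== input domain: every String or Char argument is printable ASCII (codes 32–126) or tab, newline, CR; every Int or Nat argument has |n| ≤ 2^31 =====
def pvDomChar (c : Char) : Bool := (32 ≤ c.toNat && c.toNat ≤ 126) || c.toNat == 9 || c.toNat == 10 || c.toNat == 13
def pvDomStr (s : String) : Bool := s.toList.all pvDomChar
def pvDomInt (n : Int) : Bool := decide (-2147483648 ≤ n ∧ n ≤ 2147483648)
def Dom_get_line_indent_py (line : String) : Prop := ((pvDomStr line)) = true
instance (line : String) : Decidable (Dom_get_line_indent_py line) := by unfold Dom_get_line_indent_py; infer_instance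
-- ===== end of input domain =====

-- B replaces A's char-by-char accumulation loop by lstrip(' \t') plus a prefix slice (simpler, same cost).

-- ===== PORT A =====
-- the for-loop with break: accumulate chars while they are ' ' or '\t'
def getLineIndentLoop : List Char → String → String
  | [], indent => indent
  | c :: cs, indent =>
    if c == ' ' || c == '\t' then getLineIndentLoop cs (indent.push c)
    else indent

def get_line_indent_py (line : String) : String :=
  getLineIndentLoop line.toList ""

-- ===== PORT B =====
-- lstrip(' \t') ported by hand as dropWhile over the char list (exact: Python lstrip with an
-- explicit char set drops exactly the leading chars in that set); line[:k] with 0 ≤ k is take k.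
def get_line_indent_py_alt (line : String) : String :=
  let stripped : List Char := line.toList.dropWhile (fun c => c == ' ' || c == '\t')
  String.ofList (line.toList.take (line.toList.length - stripped.length))

-- ===== PRECONDITION & SPEC =====
def Spec_get_line_indent_py (line : String) (out : String) : Prop := out = get_line_indent_py_alt line
instance (line : String) (out : String) : Decidable (Spec_get_line_indent_py line out) := by unfold Spec_get_line_indent_py; infer_instance

-- ===== CLAIM (what is proved, stated in full; the proofs are below) =====
def Claim_equal_get_line_indent_py : Prop := ∀ (line : String), Dom_get_line_indent_py line → Spec_get_line_indent_py line (get_line_indent_py line)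

-- ===== LEMMAS AND PROOFS =====
theorem getLineIndentLoop_eq (cs : List Char) (ind : String) :
    getLineIndentLoop cs ind = String.ofList (ind.toList ++ cs.takeWhile (fun c => c == ' ' || c == '\t')) := by
  induction cs generalizing ind with
  | nil => simp [getLineIndentLoop, String.ofList_toList]
  | cons c cs ih =>
    by_cases h : (c == ' ' || c == '\t') = true
    · simp [getLineIndentLoop, h, ih, String.toList_push]
    · simp [getLineIndentLoop, h, String.ofList_toList]

theorem takeWhile_eq_take_sub (p : Char → Bool) (cs : List Char) :
    cs.take (cs.length - (cs.dropWhile p).length) = cs.takeWhile p := by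
  have hlen : (cs.takeWhile p).length + (cs.dropWhile p).length = cs.length := by
    rw [← List.length_append, List.takeWhile_append_dropWhile]
  have h : cs.length - (cs.dropWhile p).length = (cs.takeWhile p).length := by omega
  rw [h]
  have hpre : cs.takeWhile p <+: cs := List.takeWhile_prefix p
  exact (List.prefix_iff_eq_take.mp hpre).symm

-- ===== VERDICT (by name: the statement is the Claim_ definition above) =====
theorem get_line_indent_py_spec : Claim_equal_get_line_indent_py := by
  intro line _
  unfold Spec_get_line_indent_py get_line_indent_py get_line_indent_py_alt
  rw [getLineIndentLoop_eq]
  simp only []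
  rw [takeWhile_eq_take_sub]
  simp
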